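-- pv_equiv track=rewrite | github.com/jfg16/COP3035_Project | file3.py | count_letter_grades
-- ===== SOURCE A (Python) =====
-- def count_letter_grades(grades):
--     count = [0, 0, 0, 0, 0]
--     # count = [A,B,C,D,F]
--     for x in grades:
--         if x >= 90:
--             count[0] = count[0] + 1
--         if x < 90 and x >= 80:
--             count[1] = count[1] + 1
--         if x < 80 and x >= 70:
--             count[2] = count[2] + 1
--         if x < 70 and x >= 60:
--             count[3] = count[3] + 1
--         if x < 60:
--             count[4] = count[4] + 1
--     return count
-- ===== SOURCE B (Python) =====
-- def count_letter_grades(grades):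
--     # Binary search over the sorted cut points instead of five range tests.
--     cuts = [60, 70, 80, 90]
--     count = [0, 0, 0, 0, 0]
--     for x in grades:
--         lo, hi = 0, 4
--         while lo < hi:  # hand-written bisect_right(cuts, x) restricted to x itself
--             mid = (lo + hi) // 2
--             if x < cuts[mid]:
--                 hi = mid
--             else:
--                 lo = mid + 1
--         count[4 - lo] += 1
--     return count
-- ===== Notes on version B (the rewrite author's own statement) =====
-- stated objective: alternative
-- what changed: Replaces A's five independent range comparisons per grade with a single hand-written binary search over the sorted list of the four cut points, bucketing each grade by indexing the counter at 4 minus the bisect position.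
import Mathlib
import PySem

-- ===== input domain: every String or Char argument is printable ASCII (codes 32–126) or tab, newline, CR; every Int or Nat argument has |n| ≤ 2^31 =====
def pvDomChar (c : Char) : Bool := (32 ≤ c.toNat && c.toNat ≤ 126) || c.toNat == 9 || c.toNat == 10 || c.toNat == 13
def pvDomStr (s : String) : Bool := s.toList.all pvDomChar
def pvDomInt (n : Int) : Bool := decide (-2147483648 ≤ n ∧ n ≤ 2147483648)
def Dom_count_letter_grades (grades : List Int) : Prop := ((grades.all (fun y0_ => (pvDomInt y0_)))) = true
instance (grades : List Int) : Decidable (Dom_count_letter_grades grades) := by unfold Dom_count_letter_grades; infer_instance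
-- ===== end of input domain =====

-- B replaces A's five range tests per grade by one binary search over the sorted cut points; same cost, alternative structure.

-- ===== PORT A =====
-- one iteration of A's for-loop: five independent if-statements updating count in place
def pvStepA (count : List Int) (x : Int) : List Int :=
  let count := if x ≥ 90 then count.set 0 (count.getD 0 0 + 1) else count
  let count := if x < 90 ∧ x ≥ 80 then count.set 1 (count.getD 1 0 + 1) else count
  let count := if x < 80 ∧ x ≥ 70 then count.set 2 (count.getD 2 0 + 1) else count
  let count := if x < 70 ∧ x ≥ 60 then count.set 3 (count.getD 3 0 + 1) else count
  if x < 60 then count.set 4 (count.getD 4 0 + 1) else count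

def count_letter_grades (grades : List Int) : List Int :=
  grades.foldl pvStepA [0, 0, 0, 0, 0]

-- ===== PORT B =====
-- the while-loop of Source B: lo, hi indices are nonnegative, so Nat; cuts[mid] is always in range
-- (0 ≤ lo ≤ mid < hi ≤ 4), getD's default is never used.
def pvBisect (cuts : List Int) (x : Int) (lo hi : Nat) : Nat :=
  if lo < hi then
    let mid := (lo + hi) / 2
    if x < cuts.getD mid 0 then pvBisect cuts x lo mid
    else pvBisect cuts x (mid + 1) hi
  else lo
termination_by hi - lo
decreasing_by all_goals omega

-- one iteration of Source B's for-loop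
def pvStepB (count : List Int) (x : Int) : List Int :=
  let lo := pvBisect [60, 70, 80, 90] x 0 4
  count.set (4 - lo) (count.getD (4 - lo) 0 + 1)

def count_letter_grades_alt (grades : List Int) : List Int :=
  grades.foldl pvStepB [0, 0, 0, 0, 0]

-- ===== PRECONDITION & SPEC =====
def Spec_count_letter_grades (grades : List Int) (out : List Int) : Prop := out = count_letter_grades_alt grades
instance (grades : List Int) (out : List Int) : Decidable (Spec_count_letter_grades grades out) := by unfold Spec_count_letter_grades; infer_instance

-- ===== CLAIM (what is proved, stated in full; the proofs are below) =====
def Claim_equal_count_letter_grades : Prop := ∀ (grades : List Int), Dom_count_letter_grades grades → Spec_count_letter_grades grades (count_letter_grades grades)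

-- ===== LEMMAS AND PROOFS =====
-- the binary search over the fixed cut list evaluates to the bucket index
theorem pvBisect_self (cuts : List Int) (x : Int) (lo : Nat) : pvBisect cuts x lo lo = lo := by
  rw [pvBisect.eq_def]; simp

theorem pvBisect_val (x : Int) :
    pvBisect [60, 70, 80, 90] x 0 4 =
      if x < 60 then 0 else if x < 70 then 1 else if x < 80 then 2 else if x < 90 then 3 else 4 := by
  rw [pvBisect.eq_def]; norm_num
  rw [pvBisect.eq_def, pvBisect.eq_def]; norm_num
  rw [pvBisect.eq_def]; norm_num
  simp only [pvBisect_self]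
  split_ifs <;> omega

-- the two loop bodies agree on every count and grade
theorem pvStep_eq (count : List Int) (x : Int) : pvStepA count x = pvStepB count x := by
  unfold pvStepA pvStepB
  rw [pvBisect_val]
  split_ifs <;> simp_all <;> omega

theorem pvFoldl_eq (l : List Int) (c : List Int) : l.foldl pvStepA c = l.foldl pvStepB c := by
  induction l generalizing c with
  | nil => rfl
  | cons a t ih => simp only [List.foldl, pvStep_eq, ih]

theorem count_letter_grades_spec : Claim_equal_count_letter_grades := by
  intro grades _
  unfold Spec_count_letter_grades count_letter_grades count_letter_grades_alt
  exact pvFoldl_eq grades [0, 0, 0, 0, 0]
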